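-- pv_equiv track=rewrite | github.com/nicolas796/Video-Generation | app/services/clip_prompt_generator.py | _determine_clip_types
-- ===== SOURCE A (Python) =====
-- from typing import Dict, Any, Optional, List
--
-- def _determine_clip_types(num_clips: int) -> List[str]:
--     """Determine the narrative type of each clip in the sequence."""
--     if num_clips == 1:
--         return ['product_showcase']
--     elif num_clips == 2:
--         return ['hook', 'cta']
--     elif num_clips == 3:
--         return ['hook', 'solution', 'cta']
--     elif num_clips == 4:
--         return ['hook', 'problem', 'solution', 'cta']
--     elif num_clips == 5:
--         return ['hook', 'problem', 'solution', 'benefits', 'cta']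
--     else:
--         base_types = ['hook', 'problem', 'solution', 'benefits', 'social_proof', 'cta']
--         types = []
--         for i in range(num_clips):
--             if i == 0:
--                 types.append('hook')
--             elif i == num_clips - 1:
--                 types.append('cta')
--             else:
--                 types.append(base_types[min(i, len(base_types) - 2)])
--         return types
-- ===== SOURCE B (Python) =====
-- _CLIP_TYPE_TABLE = {
--     1: ['product_showcase'],
--     2: ['hook', 'cta'],
--     3: ['hook', 'solution', 'cta'],
--     4: ['hook', 'problem', 'solution', 'cta'],
--     5: ['hook', 'problem', 'solution', 'benefits', 'cta'],
-- }
--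
--
-- def _determine_clip_types(num_clips):
--     """Determine the narrative type of each clip in the sequence."""
--     if num_clips in _CLIP_TYPE_TABLE:
--         return list(_CLIP_TYPE_TABLE[num_clips])
--     if num_clips >= 6:
--         return (['hook', 'problem', 'solution', 'benefits']
--                 + ['social_proof'] * (num_clips - 5)
--                 + ['cta'])
--     return []
-- ===== Notes on version B (the rewrite author's own statement) =====
-- stated objective: simpler
-- what changed: Replaces the per-index loop with min() indexing by a lookup table for the small special-cased sizes and a closed-form concatenation prefix ++ repeated middle element ++ final element for larger sizes.
import Mathlib
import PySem

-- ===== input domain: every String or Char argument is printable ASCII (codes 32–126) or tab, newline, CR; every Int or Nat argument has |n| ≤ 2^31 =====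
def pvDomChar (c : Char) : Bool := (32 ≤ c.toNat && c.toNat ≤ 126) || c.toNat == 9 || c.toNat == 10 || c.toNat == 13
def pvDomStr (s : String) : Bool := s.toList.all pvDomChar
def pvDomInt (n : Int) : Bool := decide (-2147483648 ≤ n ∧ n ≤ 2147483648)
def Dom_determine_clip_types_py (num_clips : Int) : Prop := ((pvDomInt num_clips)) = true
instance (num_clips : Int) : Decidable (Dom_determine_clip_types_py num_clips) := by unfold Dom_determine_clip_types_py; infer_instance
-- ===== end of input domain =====

-- B replaces A's per-index loop by a table for sizes 1-5 and a closed-form concatenation for sizes >= 6 (objective: simpler).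

-- ===== PORT A =====
def determine_clip_types_py (num_clips : Int) : List String :=
  if num_clips == 1 then ["product_showcase"]
  else if num_clips == 2 then ["hook", "cta"]
  else if num_clips == 3 then ["hook", "solution", "cta"]
  else if num_clips == 4 then ["hook", "problem", "solution", "cta"]
  else if num_clips == 5 then ["hook", "problem", "solution", "benefits", "cta"]
  else
    let base_types : List String := ["hook", "problem", "solution", "benefits", "social_proof", "cta"]
    -- base_types[min(i, len(base_types)-2)]: the index is always in range on the reached
    -- iterations (1 ≤ min i 4 ≤ 4), so pyGetD with a dummy default is exact here.
    (PySem.List.pyRange 0 num_clips 1).foldl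
      (fun types i =>
        if i == 0 then types ++ ["hook"]
        else if i == num_clips - 1 then types ++ ["cta"]
        else types ++ [PySem.List.pyGetD base_types (min i ((base_types.length : Int) - 2)) ""])
      []

-- ===== PORT B =====
-- the dict literal _CLIP_TYPE_TABLE, built by successive insertion (Python dict-literal semantics)
def pvClipTypeTable : PySem.Dict Int (List String) :=
  (((((PySem.Dict.empty.insert 1 ["product_showcase"]).insert
      2 ["hook", "cta"]).insert
      3 ["hook", "solution", "cta"]).insert
      4 ["hook", "problem", "solution", "cta"]).insert
      5 ["hook", "problem", "solution", "benefits", "cta"])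

def determine_clip_types_py_alt (num_clips : Int) : List String :=
  match PySem.Dict.get? pvClipTypeTable num_clips with
  | some ts => ts
  | none =>
    if 6 ≤ num_clips then
      ["hook", "problem", "solution", "benefits"]
        ++ List.replicate (num_clips - 5).toNat "social_proof"
        ++ ["cta"]
    else []

-- ===== PRECONDITION & SPEC =====
def Spec_determine_clip_types_py (num_clips : Int) (out : List String) : Prop := out = determine_clip_types_py_alt num_clips
instance (num_clips : Int) (out : List String) : Decidable (Spec_determine_clip_types_py num_clips out) := by unfold Spec_determine_clip_types_py; infer_instance

-- ===== CLAIM (what is proved, stated in full; the proofs are below) =====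
def Claim_equal_determine_clip_types_py : Prop := ∀ (num_clips : Int), Dom_determine_clip_types_py num_clips → Spec_determine_clip_types_py num_clips (determine_clip_types_py num_clips)

-- ===== LEMMAS AND PROOFS =====

-- the loop body of A, as the per-index element it appends
def pvAElem (n i : Int) : String :=
  if i == 0 then "hook"
  else if i == n - 1 then "cta"
  else PySem.List.pyGetD ["hook", "problem", "solution", "benefits", "social_proof", "cta"]
        (min i ((6 : Int) - 2)) ""

lemma pvA_big (n : Int) (h : 6 ≤ n) :
    determine_clip_types_py n =
      ["hook", "problem", "solution", "benefits"]
        ++ List.replicate (n - 5).toNat "social_proof" ++ ["cta"] := by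
  have h1 : determine_clip_types_py n = (PySem.List.pyRange 0 n 1).map (pvAElem n) := by
    unfold determine_clip_types_py
    rw [if_neg (by simp; omega), if_neg (by simp; omega), if_neg (by simp; omega),
        if_neg (by simp; omega), if_neg (by simp; omega)]
    have hb : (fun (types : List String) (i : Int) =>
        if i == 0 then types ++ ["hook"]
        else if i == n - 1 then types ++ ["cta"]
        else types ++ [PySem.List.pyGetD
          ["hook", "problem", "solution", "benefits", "social_proof", "cta"]
          (min i ((([("hook" : String), "problem", "solution", "benefits", "social_proof", "cta"].length : Int)) - 2)) ""])
        = fun (types : List String) (i : Int) => types ++ [pvAElem n i] := by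
      funext types i
      cases h0 : (i == 0) <;> cases hl : (i == n - 1) <;> simp [pvAElem, h0, hl]
    dsimp only
    rw [hb, PySem.List.foldl_append_singleton_eq_map, List.nil_append]
  rw [h1,
      PySem.List.pyRange_one_append 0 4 n (by omega) (by omega),
      PySem.List.pyRange_one_append 4 (n - 1) n (by omega) (by omega)]
  have hlast : PySem.List.pyRange (n - 1) n 1 = [n - 1] := by
    have := PySem.List.pyRange_one_singleton (n - 1)
    simpa [show n - 1 + 1 = n by omega] using this
  have hhead : PySem.List.pyRange 0 4 1 = [0, 1, 2, 3] := by decide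
  have hmid : (PySem.List.pyRange 4 (n - 1) 1).map (pvAElem n)
      = List.replicate (n - 5).toNat "social_proof" := by
    have hcongr : (PySem.List.pyRange 4 (n - 1) 1).map (pvAElem n)
        = (PySem.List.pyRange 4 (n - 1) 1).map (fun _ => "social_proof") := by
      apply List.map_congr_left
      intro i hi
      rw [PySem.List.mem_pyRange_one] at hi
      have hmin : min i ((6 : Int) - 2) = 4 := by omega
      simp only [pvAElem, hmin]
      rw [if_neg (by simp; omega), if_neg (by simp; omega)]
      decide
    rw [hcongr, List.map_const']
    congr 1
    rw [PySem.List.length_pyRange_one]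
    omega
  simp only [List.map_append, hhead, hlast, hmid]
  simp only [List.map_cons, List.map_nil]
  have e0 : pvAElem n 0 = "hook" := by simp [pvAElem]
  have e1 : pvAElem n 1 = "problem" := by
    simp only [pvAElem]
    rw [if_neg (by decide), if_neg (by simp; omega)]; decide
  have e2 : pvAElem n 2 = "solution" := by
    simp only [pvAElem]
    rw [if_neg (by decide), if_neg (by simp; omega)]; decide
  have e3 : pvAElem n 3 = "benefits" := by
    simp only [pvAElem]
    rw [if_neg (by decide), if_neg (by simp; omega)]; decide
  have e4 : pvAElem n (n - 1) = "cta" := by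
    simp only [pvAElem]
    rw [if_neg (by simp; omega), if_pos (by simp)]
  rw [e0, e1, e2, e3, e4]
  simp

lemma pvTable_none (n : Int) (h : n ≤ 0 ∨ 6 ≤ n) :
    PySem.Dict.get? pvClipTypeTable n = none := by
  unfold pvClipTypeTable
  rw [PySem.Dict.get?_insert, PySem.Dict.get?_insert, PySem.Dict.get?_insert,
      PySem.Dict.get?_insert, PySem.Dict.get?_insert, PySem.Dict.get?_empty,
      if_neg (by omega), if_neg (by omega), if_neg (by omega), if_neg (by omega),
      if_neg (by omega)]

-- ===== VERDICT (by name: the statement is the Claim_ definition above) =====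
theorem determine_clip_types_py_spec : Claim_equal_determine_clip_types_py := by
  intro n _
  unfold Spec_determine_clip_types_py
  by_cases h1 : n = 1; · subst h1; rfl
  by_cases h2 : n = 2; · subst h2; rfl
  by_cases h3 : n = 3; · subst h3; rfl
  by_cases h4 : n = 4; · subst h4; rfl
  by_cases h5 : n = 5; · subst h5; rfl
  by_cases h6 : 6 ≤ n
  · rw [pvA_big n h6]
    unfold determine_clip_types_py_alt
    rw [pvTable_none n (Or.inr h6), if_pos h6]
  · have hle : n ≤ 0 := by omega
    unfold determine_clip_types_py determine_clip_types_py_alt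
    rw [pvTable_none n (Or.inl hle)]
    rw [if_neg (by simp; omega), if_neg (by simp; omega), if_neg (by simp; omega),
        if_neg (by simp; omega), if_neg (by simp; omega),
        PySem.List.pyRange_one_eq_nil hle, if_neg (by omega)]
    rfl
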